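-- pv_equiv track=rewrite | github.com/janjoswig/CommonNNClustering | cnnclustering/_fits.py | fit_from_neighbours
-- ===== SOURCE A (Python) =====
-- from collections import deque
-- from typing import List, Set
--
-- def fit_from_neighbours(
--         cnn_cutoff: int,
--         neighbourhoods: List[Set[int]]) -> List[int]:
--     """Worker function variant applying the CNN algorithm.
--
--     Assigns labels to points starting from pre-computed neighbourhoods.
--     Uses Python standard library only.
--
--     Args:
--         cnn_cutoff: Points need to share at least this many neighbours
--             to be assigned to the same cluster (similarity criterion).
--         neighbourhoods: List of length #points containing sets of
--             neighbouring point indices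
--
--     Returns:
--         Labels
--     """
--
--     # Number of points
--     len_ = len(neighbourhoods)
--
--     # Initialise labels
--     labels = [0 for _ in range(len_)]
--
--     # Track assignment
--     consider = [True for _ in range(len_)]
--
--     # Start with first cluster (0 = noise)
--     current = 1
--
--     # Initialise queue of points to scan
--     queue = deque()
--
--     for init_point in range(len_):
--         if not consider[init_point]:
--             # Point already assigned
--             continue
--
--         neighbours = neighbourhoods[init_point]
--         if len(neighbours) <= cnn_cutoff:
--             # Point can not fulfill cnn condition
--             labels[init_point] = 0             # Assign cluster label
--             consider[init_point] = False       # Mark point as included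
--             continue
--
--         labels[init_point] = current           # Assign cluster label
--         consider[init_point] = False           # Mark point as included
--
--         point = init_point
--         while True:
--             # Loop over neighbouring points
--             for member in neighbours:
--                 if not consider[member]:
--                     # Point already assigned
--                     continue
--
--                 neighbour_neighbours = neighbourhoods[member]
--                 if len(neighbour_neighbours) <= cnn_cutoff:
--                     labels[member] = 0
--                     consider[member] = False
--                     continue
--
--                 # conditional growth
--                 if (len(neighbours.intersection(neighbour_neighbours))
--                         >= cnn_cutoff):
--                     labels[member] = current
--                     consider[member] = False
--                     queue.append(member)
--
--             try:
--                 while True: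
--                     point = queue.popleft()  # FIFO
--                     neighbours = neighbourhoods[point]
--                     if len(neighbourhoods[point]) <= cnn_cutoff:
--                         labels[point] = 0
--                         consider[point] = False
--                         continue
--                     break
--             except IndexError:
--                 # Queue empty
--                 break
--
--         current += 1
--
--     return labels
-- ===== SOURCE B (Python) =====
-- from collections import deque
-- from typing import List, Set
--
--
-- def fit_from_neighbours(
--         cnn_cutoff: int,
--         neighbourhoods: List[Set[int]]) -> List[int]:
--     """CNN labelling via a precomputed adjacency list and a canonical FIFO BFS."""
--     n = len(neighbourhoods)
--
--     # Core points can start/extend clusters; others stay noise (label 0).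
--     core = [len(nb) > cnn_cutoff for nb in neighbourhoods]
--
--     # Directed adjacency: keep v in N(u) iff v is core and the similarity holds.
--     adj = []
--     for u in range(n):
--         if core[u]:
--             nb = neighbourhoods[u]
--             adj.append([v for v in nb
--                         if core[v] and len(nb & neighbourhoods[v]) >= cnn_cutoff])
--         else:
--             adj.append([])
--
--     labels = [0] * n
--     current = 1
--     for seed in range(n):
--         if labels[seed] != 0 or not core[seed]:
--             continue
--         labels[seed] = current
--         queue = deque([seed])
--         while queue:
--             u = queue.popleft()
--             for v in adj[u]:
--                 if labels[v] == 0: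
--                     labels[v] = current
--                     queue.append(v)
--         current += 1
--     return labels
-- ===== Notes on version B (the rewrite author's own statement) =====
-- stated objective: simpler
-- what changed: B precomputes an explicit adjacency list (core test + shared-neighbour similarity done once per edge in a construction pass) and then labels components with a single canonical FIFO BFS keyed on labels only, eliminating A's consider array, its in-traversal noise re-marking and the dead degree re-check in the pop loop.
import Mathlib
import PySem

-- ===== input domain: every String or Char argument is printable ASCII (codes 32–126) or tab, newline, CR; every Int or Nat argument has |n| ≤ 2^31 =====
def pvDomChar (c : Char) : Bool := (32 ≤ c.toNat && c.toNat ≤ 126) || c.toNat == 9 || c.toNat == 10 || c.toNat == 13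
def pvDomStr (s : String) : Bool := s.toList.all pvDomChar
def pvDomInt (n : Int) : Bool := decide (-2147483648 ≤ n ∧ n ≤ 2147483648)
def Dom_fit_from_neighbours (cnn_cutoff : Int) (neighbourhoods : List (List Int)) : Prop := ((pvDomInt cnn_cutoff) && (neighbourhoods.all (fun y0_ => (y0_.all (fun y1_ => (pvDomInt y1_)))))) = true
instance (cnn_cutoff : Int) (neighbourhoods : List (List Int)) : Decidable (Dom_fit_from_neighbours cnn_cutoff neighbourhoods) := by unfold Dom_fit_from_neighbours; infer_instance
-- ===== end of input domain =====

-- B replaces A's on-the-fly similarity tests, `consider` array and dead pop-time re-check by a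
-- precomputed adjacency list followed by a canonical FIFO BFS over it (objective: simpler).

-- Python list index with negative wraparound, canonicalised to a Nat position.
def pvIdx (len : Nat) (i : Int) : Nat := (if i < 0 then i + len else i).toNat

-- Shared indexing helpers: xs[i] / xs[i] = a with Python's negative wraparound. Exact under Pre_
-- (every index used is in [-len, len); Python raises IndexError outside, excluded by Pre_).
def pvGetI {α : Type} (xs : List α) (d : α) (i : Int) : α :=
  if -(xs.length : Int) ≤ i ∧ i < (xs.length : Int) then xs.getD (pvIdx xs.length i) d else d

def pvSetI {α : Type} (xs : List α) (i : Int) (a : α) : List α :=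
  if -(xs.length : Int) ≤ i ∧ i < (xs.length : Int) then xs.set (pvIdx xs.length i) a else xs

-- len(xs.intersection(ys)) on Set-invariant lists
def pvInterLen (xs ys : List Int) : Int := ((PySem.Set.inter xs ys).length : Int)

-- ===== PORT A =====
-- (the set[int] arguments become PySem.Set.ofList; the labels computed by the loops below do not
-- depend on the iteration order a CPython set would use, each cluster being closed under the same
-- point-to-point similarity tests in any order)
-- body of A's `for member in neighbours` loop; state = (labels, consider, queue)
def pvStepA (cnn_cutoff : Int) (nbhd : List (List Int)) (current : Int) (neighbours : List Int)
    (st : List Int × List Bool × List Int) (member : Int) : List Int × List Bool × List Int :=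
  if pvGetI st.2.1 false member = false then st
  else
    let nn := pvGetI nbhd [] member
    if (nn.length : Int) ≤ cnn_cutoff then
      (pvSetI st.1 member 0, pvSetI st.2.1 member false, st.2.2)
    else if cnn_cutoff ≤ pvInterLen neighbours nn then
      (pvSetI st.1 member current, pvSetI st.2.1 member false, st.2.2 ++ [member])
    else st

-- A's `try: while True: point = queue.popleft() …` block; none = IndexError (queue empty)
def pvPopA (cnn_cutoff : Int) (nbhd : List (List Int)) :
    List Int → List Int → List Bool → Option (Int × List Int × List Int × List Bool)
  | [], _, _ => none
  | p :: rest, labels, consider =>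
    if ((pvGetI nbhd [] p).length : Int) ≤ cnn_cutoff then
      pvPopA cnn_cutoff nbhd rest (pvSetI labels p 0) (pvSetI consider p false)
    else some (p, rest, labels, consider)

-- A's `while True` loop.  fuel: one unit per iteration; each point is enqueued at most once
-- (consider is cleared on enqueue), so iterations ≤ 1 + #pops ≤ n + 1 and fuel n+1 never runs out.
def pvWhileA (cnn_cutoff : Int) (nbhd : List (List Int)) (current : Int) :
    Nat → Int → List Int → List Bool → List Int → List Int × List Bool
  | 0, _, labels, consider, _ => (labels, consider)
  | fuel + 1, point, labels, consider, queue =>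
    let neighbours := pvGetI nbhd [] point
    let st := neighbours.foldl (pvStepA cnn_cutoff nbhd current neighbours) (labels, consider, queue)
    match pvPopA cnn_cutoff nbhd st.2.2 st.1 st.2.1 with
    | none => (st.1, st.2.1)
    | some (p, q, l, c) => pvWhileA cnn_cutoff nbhd current fuel p l c q

-- body of A's `for init_point in range(len_)` loop; state = (labels, consider, current)
def pvOuterA (cnn_cutoff : Int) (nbhd : List (List Int))
    (st : List Int × List Bool × Int) (i : Nat) : List Int × List Bool × Int :=
  if pvGetI st.2.1 false (i : Int) = false then st
  else
    let neighbours := pvGetI nbhd [] (i : Int)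
    if (neighbours.length : Int) ≤ cnn_cutoff then
      (pvSetI st.1 (i : Int) 0, pvSetI st.2.1 (i : Int) false, st.2.2)
    else
      let labels := pvSetI st.1 (i : Int) st.2.2
      let consider := pvSetI st.2.1 (i : Int) false
      let lc := pvWhileA cnn_cutoff nbhd st.2.2 (nbhd.length + 1) (i : Int) labels consider []
      (lc.1, lc.2, st.2.2 + 1)

def fit_from_neighbours (cnn_cutoff : Int) (neighbourhoods : List (List Int)) : List Int :=
  let nbhd := neighbourhoods.map (fun nb => PySem.Set.ofList nb)
  let n := nbhd.length  -- = len(neighbourhoods)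
  ((List.range n).foldl (pvOuterA cnn_cutoff nbhd)
    (List.replicate n 0, List.replicate n true, 1)).1

-- ===== PORT B =====
-- core[v] of Source B: len(neighbourhoods[v]) > cnn_cutoff (wrapping index, like Python)
def pvCore (cnn_cutoff : Int) (nbhd : List (List Int)) (v : Int) : Bool :=
  cnn_cutoff < ((pvGetI nbhd [] v).length : Int)

-- Source B's adjacency pass
def pvAdj (cnn_cutoff : Int) (nbhd : List (List Int)) : List (List Int) :=
  (List.range nbhd.length).map (fun (u : Nat) =>
    if pvCore cnn_cutoff nbhd (u : Int) then
      (pvGetI nbhd [] (u : Int)).filter (fun v =>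
        pvCore cnn_cutoff nbhd v &&
          decide (cnn_cutoff ≤ pvInterLen (pvGetI nbhd [] (u : Int)) (pvGetI nbhd [] v)))
    else [])

-- body of Source B's `for v in adj[u]` loop; state = (labels, queue)
def pvStepB (current : Int) (st : List Int × List Int) (v : Int) : List Int × List Int :=
  if pvGetI st.1 0 v = 0 then (pvSetI st.1 v current, st.2 ++ [v]) else st

-- Source B's `while queue` loop; fuel as in pvWhileA (one unit per pop, ≤ n pops)
def pvWhileB (adj : List (List Int)) (current : Int) :
    Nat → List Int → List Int → List Int
  | 0, labels, _ => labels
  | _ + 1, labels, [] => labels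
  | fuel + 1, labels, u :: rest =>
    let st := (pvGetI adj [] u).foldl (pvStepB current) (labels, rest)
    pvWhileB adj current fuel st.1 st.2

-- body of Source B's `for seed in range(n)` loop; state = (labels, current)
def pvOuterB (cnn_cutoff : Int) (nbhd : List (List Int)) (adj : List (List Int))
    (st : List Int × Int) (seed : Nat) : List Int × Int :=
  if st.1.getD seed 0 ≠ 0 then st
  else if pvCore cnn_cutoff nbhd (seed : Int) = false then st
  else
    let labels := pvSetI st.1 (seed : Int) st.2
    (pvWhileB adj st.2 (nbhd.length + 1) labels [(seed : Int)], st.2 + 1)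

def fit_from_neighbours_alt (cnn_cutoff : Int) (neighbourhoods : List (List Int)) : List Int :=
  let nbhd := neighbourhoods.map (fun nb => PySem.Set.ofList nb)
  let n := nbhd.length  -- = len(neighbourhoods)
  let adj := pvAdj cnn_cutoff nbhd
  ((List.range n).foldl (pvOuterB cnn_cutoff nbhd adj)
    (List.replicate n 0, 1)).1

-- ===== PRECONDITION & SPEC =====
-- Pre_ is exactly A's domain: A indexes `neighbourhoods[member]` (and consider/labels[member])
-- precisely for the members of the neighbour sets of core points (sets with more than cnn_cutoff
-- distinct elements), and raises IndexError iff such a member lies outside [-n, n).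
def Pre_fit_from_neighbours (cnn_cutoff : Int) (neighbourhoods : List (List Int)) : Prop :=
  ∀ nb ∈ neighbourhoods,
    cnn_cutoff < ((PySem.Set.ofList nb).length : Int) →
    ∀ v ∈ nb, -(neighbourhoods.length : Int) ≤ v ∧ v < (neighbourhoods.length : Int)

instance (cnn_cutoff : Int) (neighbourhoods : List (List Int)) :
    Decidable (Pre_fit_from_neighbours cnn_cutoff neighbourhoods) := by
  unfold Pre_fit_from_neighbours; infer_instance

def pvWitness_fit_from_neighbours : Int × List (List Int) :=
  (1, [[1, 2], [0, 2], [0, 1], []])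

def Spec_fit_from_neighbours (cnn_cutoff : Int) (neighbourhoods : List (List Int)) (out : List Int) : Prop := out = fit_from_neighbours_alt cnn_cutoff neighbourhoods
instance (cnn_cutoff : Int) (neighbourhoods : List (List Int)) (out : List Int) : Decidable (Spec_fit_from_neighbours cnn_cutoff neighbourhoods out) := by unfold Spec_fit_from_neighbours; infer_instance

-- ===== CLAIM (what is proved, stated in full; the proofs are below) =====
def Claim_equal_fit_from_neighbours : Prop := ∀ (cnn_cutoff : Int) (neighbourhoods : List (List Int)), Dom_fit_from_neighbours cnn_cutoff neighbourhoods → Pre_fit_from_neighbours cnn_cutoff neighbourhoods → Spec_fit_from_neighbours cnn_cutoff neighbourhoods (fit_from_neighbours cnn_cutoff neighbourhoods)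

-- ===== LEMMAS AND PROOFS =====

-- membership bounds for the (deduplicated) neighbour sets of core points, phrased on the mapped list
def pvPre' (cnn_cutoff : Int) (nbhd : List (List Int)) : Prop :=
  ∀ nb ∈ nbhd, cnn_cutoff < (nb.length : Int) →
    ∀ v ∈ nb, -(nbhd.length : Int) ≤ v ∧ v < (nbhd.length : Int)

-- the filter predicate Source B uses when building adj[u]
def pvPred (cnn_cutoff : Int) (nbhd : List (List Int)) (u : Int) (v : Int) : Bool :=
  pvCore cnn_cutoff nbhd v &&
    decide (cnn_cutoff ≤ pvInterLen (pvGetI nbhd [] u) (pvGetI nbhd [] v))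

-- coupling invariant between A's (labels, consider) and B's labels (they are the SAME list):
-- a point still under consideration is unlabelled, and a core point is under consideration
-- exactly while it is unlabelled.
def pvRel (cnn_cutoff : Int) (nbhd : List (List Int))
    (labels : List Int) (consider : List Bool) : Prop :=
  labels.length = nbhd.length ∧ consider.length = nbhd.length ∧
  ∀ k : Nat, k < nbhd.length →
    (consider.getD k false = true → labels.getD k 0 = 0) ∧
    (pvCore cnn_cutoff nbhd (k : Int) = true →
      (consider.getD k false = true ↔ labels.getD k 0 = 0))

-- queue invariant: every queued point is an in-range core point already labelled ≠ 0
def pvQInv (cnn_cutoff : Int) (nbhd : List (List Int))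
    (labels : List Int) (queue : List Int) : Prop :=
  ∀ v ∈ queue, (-(nbhd.length : Int) ≤ v ∧ v < (nbhd.length : Int)) ∧
    pvCore cnn_cutoff nbhd v = true ∧ labels.getD (pvIdx nbhd.length v) 0 ≠ 0

-- nonzero labels are never rewritten
def pvMono (labels labels' : List Int) : Prop :=
  ∀ k : Nat, labels.getD k 0 ≠ 0 → labels'.getD k 0 = labels.getD k 0

theorem pv_getD_set_eq {α : Type} (xs : List α) (k : Nat) (a d : α) (h : k < xs.length) :
    (xs.set k a).getD k d = a := by
  simp [List.getD_eq_getElem?_getD, h]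

theorem pv_getD_set_ne {α : Type} (xs : List α) (k j : Nat) (a d : α) (h : k ≠ j) :
    (xs.set k a).getD j d = xs.getD j d := by
  simp [List.getD_eq_getElem?_getD, List.getElem?_set_ne h]

theorem pv_set_self (xs : List Int) (k : Nat) (h : k < xs.length) (hv : xs.getD k 0 = 0) :
    xs.set k 0 = xs := by
  have := List.getD_eq_getElem xs 0 h
  rw [this] at hv
  rw [← hv]
  simp

theorem pvIdx_lt (n : Nat) (i : Int) (h0 : -(n : Int) ≤ i) (h1 : i < (n : Int)) :
    pvIdx n i < n := by
  unfold pvIdx; split <;> omega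

theorem pvIdx_natCast (n k : Nat) : pvIdx n (k : Int) = k := by
  unfold pvIdx; split <;> omega

theorem pvGetI_eq_getD {α : Type} (xs : List α) (d : α) (i : Int)
    (h0 : -(xs.length : Int) ≤ i) (h1 : i < (xs.length : Int)) :
    pvGetI xs d i = xs.getD (pvIdx xs.length i) d := by
  simp [pvGetI, h0, h1]

theorem pvSetI_eq_set {α : Type} (xs : List α) (i : Int) (a : α)
    (h0 : -(xs.length : Int) ≤ i) (h1 : i < (xs.length : Int)) :
    pvSetI xs i a = xs.set (pvIdx xs.length i) a := by
  simp [pvSetI, h0, h1]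

theorem pvGetI_natCast {α : Type} (xs : List α) (d : α) (k : Nat) (h : k < xs.length) :
    pvGetI xs d (k : Int) = xs.getD k d := by
  rw [pvGetI_eq_getD _ _ _ (by omega) (by exact_mod_cast h), pvIdx_natCast]

theorem pvGetI_wrap {α : Type} (xs : List α) (d : α) (i : Int)
    (h0 : -(xs.length : Int) ≤ i) (h1 : i < (xs.length : Int)) :
    pvGetI xs d i = pvGetI xs d ((pvIdx xs.length i : Nat) : Int) := by
  rw [pvGetI_eq_getD _ _ _ h0 h1, pvGetI_natCast _ _ _ (pvIdx_lt _ _ h0 h1)]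

theorem pvCore_wrap (cnn_cutoff : Int) (nbhd : List (List Int)) (i : Int)
    (h0 : -(nbhd.length : Int) ≤ i) (h1 : i < (nbhd.length : Int)) :
    pvCore cnn_cutoff nbhd ((pvIdx nbhd.length i : Nat) : Int) = pvCore cnn_cutoff nbhd i := by
  unfold pvCore
  rw [← pvGetI_wrap _ _ _ h0 h1]

theorem pvNb_mem (nbhd : List (List Int)) (u : Int)
    (h0 : -(nbhd.length : Int) ≤ u) (h1 : u < (nbhd.length : Int)) :
    pvGetI nbhd [] u ∈ nbhd := by
  have hu : pvIdx nbhd.length u < nbhd.length := pvIdx_lt _ _ h0 h1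
  rw [pvGetI_eq_getD _ _ _ h0 h1, List.getD_eq_getElem _ _ hu]
  exact List.getElem_mem hu

theorem pvAdj_spec (cnn_cutoff : Int) (nbhd : List (List Int)) (u : Int)
    (h0 : -(nbhd.length : Int) ≤ u) (h1 : u < (nbhd.length : Int))
    (hc : pvCore cnn_cutoff nbhd u = true) :
    pvGetI (pvAdj cnn_cutoff nbhd) [] u =
      (pvGetI nbhd [] u).filter (pvPred cnn_cutoff nbhd u) := by
  have hu : pvIdx nbhd.length u < nbhd.length := pvIdx_lt _ _ h0 h1
  have hlen : (pvAdj cnn_cutoff nbhd).length = nbhd.length := by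
    simp [pvAdj]
  rw [pvGetI_eq_getD _ _ _ (by rw [hlen]; exact h0) (by rw [hlen]; exact h1), hlen]
  unfold pvAdj
  rw [PySem.List.getD_map_range _ _ _ _ hu]
  rw [pvCore_wrap cnn_cutoff nbhd u h0 h1] at *
  simp only [hc, if_true]
  rw [← pvGetI_wrap _ _ _ h0 h1]
  rw [show (fun v => pvCore cnn_cutoff nbhd v &&
      decide (cnn_cutoff ≤ pvInterLen (pvGetI nbhd [] u) (pvGetI nbhd [] v))) =
    pvPred cnn_cutoff nbhd u from rfl]

-- one member of the inner loop: A's step and B's conditional step coincide and preserve the invariants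
theorem pvStep_sim (cnn_cutoff : Int) (nbhd : List (List Int)) (current : Int)
    (hcur : current ≠ 0) (neighbours : List Int) (u : Int)
    (labels : List Int) (consider : List Bool) (queue : List Int) (m : Int)
    (hm0 : -(nbhd.length : Int) ≤ m) (hm1 : m < (nbhd.length : Int))
    (hnb : neighbours = pvGetI nbhd [] u)
    (hrel : pvRel cnn_cutoff nbhd labels consider)
    (hq : pvQInv cnn_cutoff nbhd labels queue) :
    (if pvPred cnn_cutoff nbhd u m then pvStepB current (labels, queue) m else (labels, queue)) =
      ((pvStepA cnn_cutoff nbhd current neighbours (labels, consider, queue) m).1,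
       (pvStepA cnn_cutoff nbhd current neighbours (labels, consider, queue) m).2.2) ∧
    pvRel cnn_cutoff nbhd (pvStepA cnn_cutoff nbhd current neighbours (labels, consider, queue) m).1
      (pvStepA cnn_cutoff nbhd current neighbours (labels, consider, queue) m).2.1 ∧
    pvQInv cnn_cutoff nbhd (pvStepA cnn_cutoff nbhd current neighbours (labels, consider, queue) m).1
      (pvStepA cnn_cutoff nbhd current neighbours (labels, consider, queue) m).2.2 ∧
    pvMono labels (pvStepA cnn_cutoff nbhd current neighbours (labels, consider, queue) m).1 := by
  obtain ⟨hrl, hrc, hrk⟩ := hrel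
  have hmN : pvIdx nbhd.length m < nbhd.length := pvIdx_lt _ _ hm0 hm1
  have hcw : pvCore cnn_cutoff nbhd ((pvIdx nbhd.length m : Nat) : Int) =
      pvCore cnn_cutoff nbhd m := pvCore_wrap cnn_cutoff nbhd m hm0 hm1
  have hgc : pvGetI consider false m = consider.getD (pvIdx nbhd.length m) false := by
    rw [pvGetI_eq_getD _ _ _ (by omega) (by omega), hrc]
  have hgl : pvGetI labels 0 m = labels.getD (pvIdx nbhd.length m) 0 := by
    rw [pvGetI_eq_getD _ _ _ (by omega) (by omega), hrl]
  have hsl : ∀ a : Int, pvSetI labels m a = labels.set (pvIdx nbhd.length m) a := fun a => by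
    rw [pvSetI_eq_set _ _ _ (by omega) (by omega), hrl]
  have hsc : ∀ b : Bool, pvSetI consider m b = consider.set (pvIdx nbhd.length m) b := fun b => by
    rw [pvSetI_eq_set _ _ _ (by omega) (by omega), hrc]
  have hmL : pvIdx nbhd.length m < labels.length := by omega
  have hmC : pvIdx nbhd.length m < consider.length := by omega
  by_cases hcm : consider.getD (pvIdx nbhd.length m) false = true
  · have hl0 : labels.getD (pvIdx nbhd.length m) 0 = 0 := (hrk (pvIdx nbhd.length m) hmN).1 hcm
    by_cases hcore : pvCore cnn_cutoff nbhd m = true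
    · have hnle : ¬ ((pvGetI nbhd [] m).length : Int) ≤ cnn_cutoff := by
        simp only [pvCore, decide_eq_true_eq] at hcore; omega
      by_cases hint : cnn_cutoff ≤ pvInterLen neighbours (pvGetI nbhd [] m)
      · -- enqueue branch
        have hA : pvStepA cnn_cutoff nbhd current neighbours (labels, consider, queue) m =
            (labels.set (pvIdx nbhd.length m) current,
             consider.set (pvIdx nbhd.length m) false, queue ++ [m]) := by
          simp only [pvStepA, hgc, hcm, hnle, hint, hsl, hsc]
          simp
        have hpred : pvPred cnn_cutoff nbhd u m = true := by
          simp only [pvPred, ← hnb, hcore, hint, decide_true, Bool.and_self]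
        rw [hA, hpred]
        refine ⟨?_, ⟨?_, ?_, ?_⟩, ?_, ?_⟩
        · simp only [if_true, pvStepB, hgl, hl0, hsl]
        · simpa using hrl
        · simpa using hrc
        · intro k hk
          by_cases hkm : k = pvIdx nbhd.length m
          · subst hkm
            constructor
            · intro hf; rw [pv_getD_set_eq _ _ _ _ hmC] at hf; exact absurd hf (by simp)
            · intro _
              rw [pv_getD_set_eq _ _ _ _ hmC, pv_getD_set_eq _ _ _ _ hmL]
              simp [hcur]
          · rw [pv_getD_set_ne _ _ _ _ _ (fun h => hkm h.symm),
                pv_getD_set_ne _ _ _ _ _ (fun h => hkm h.symm)]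
            exact hrk k hk
        · intro v hv
          rcases List.mem_append.mp hv with hv | hv
          · obtain ⟨h1, h3, h4⟩ := hq v hv
            refine ⟨h1, h3, ?_⟩
            have hvm : pvIdx nbhd.length v ≠ pvIdx nbhd.length m := by
              intro he; rw [he] at h4; exact h4 hl0
            rw [pv_getD_set_ne _ _ _ _ _ (fun h => hvm h.symm)]
            exact h4
          · rcases List.mem_singleton.mp hv with rfl
            exact ⟨⟨hm0, hm1⟩, hcore, by rw [pv_getD_set_eq _ _ _ _ hmL]; exact hcur⟩
        · intro k hk
          have hkm : k ≠ pvIdx nbhd.length m := by intro he; rw [he] at hk; exact hk hl0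
          rw [pv_getD_set_ne _ _ _ _ _ (fun h => hkm h.symm)]
      · -- similarity fails: both sides skip
        have hA : pvStepA cnn_cutoff nbhd current neighbours (labels, consider, queue) m =
            (labels, consider, queue) := by
          simp only [pvStepA, hgc, hcm, hnle, hint]
          simp
        have hpred : pvPred cnn_cutoff nbhd u m = false := by
          simp only [pvPred, ← hnb, Bool.and_eq_false_iff, decide_eq_false_iff_not]
          exact Or.inr hint
        rw [hA, hpred]
        exact ⟨by simp, ⟨hrl, hrc, hrk⟩, hq, fun k _ => rfl⟩
    · -- noise branch: A writes 0 over 0 and clears consider; B skips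
      have hle : ((pvGetI nbhd [] m).length : Int) ≤ cnn_cutoff := by
        simp only [pvCore, decide_eq_true_eq] at hcore; omega
      have hA : pvStepA cnn_cutoff nbhd current neighbours (labels, consider, queue) m =
          (labels, consider.set (pvIdx nbhd.length m) false, queue) := by
        simp only [pvStepA, hgc, hcm, hle, hsl, hsc]
        simp [pv_set_self labels (pvIdx nbhd.length m) hmL hl0]
      have hpred : pvPred cnn_cutoff nbhd u m = false := by
        simp only [pvPred, Bool.and_eq_false_iff]
        exact Or.inl (by simpa using hcore)
      rw [hA, hpred]
      refine ⟨by simp, ⟨hrl, by simpa using hrc, ?_⟩, hq, fun k _ => rfl⟩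
      intro k hk
      by_cases hkm : k = pvIdx nbhd.length m
      · subst hkm
        constructor
        · intro hf; rw [pv_getD_set_eq _ _ _ _ hmC] at hf; exact absurd hf (by simp)
        · intro hc; rw [hcw] at hc; exact absurd hc hcore
      · rw [pv_getD_set_ne _ _ _ _ _ (fun h => hkm h.symm)]
        exact hrk k hk
  · -- consider[m] already false: A skips; B skips too (if core then labelled ≠ 0)
    have hcf : consider.getD (pvIdx nbhd.length m) false = false := by
      cases h : consider.getD (pvIdx nbhd.length m) false
      · rfl
      · exact absurd h hcm
    have hA : pvStepA cnn_cutoff nbhd current neighbours (labels, consider, queue) m =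
        (labels, consider, queue) := by
      simp only [pvStepA, hgc, hcf]
      simp
    rw [hA]
    refine ⟨?_, ⟨hrl, hrc, hrk⟩, hq, fun k _ => rfl⟩
    by_cases hpred : pvPred cnn_cutoff nbhd u m = true
    · have hcore : pvCore cnn_cutoff nbhd m = true := by
        simp only [pvPred, Bool.and_eq_true] at hpred
        exact hpred.1
      have hlm : labels.getD (pvIdx nbhd.length m) 0 ≠ 0 := by
        intro h0
        have := ((hrk (pvIdx nbhd.length m) hmN).2 (by rw [hcw]; exact hcore)).mpr h0
        rw [hcf] at this; exact absurd this (by simp)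
      rw [hpred]
      simp only [if_true, pvStepB, hgl]
      rw [if_neg hlm]
    · simp [hpred]

-- the whole inner loop: A's fold over N(u) equals B's fold over adj[u]
theorem pvFold_sim (cnn_cutoff : Int) (nbhd : List (List Int)) (current : Int)
    (hcur : current ≠ 0) (u : Int) (neighbours : List Int)
    (hnb : neighbours = pvGetI nbhd [] u) :
    ∀ (ms : List Int) (labels : List Int) (consider : List Bool) (queue : List Int),
    (∀ v ∈ ms, -(nbhd.length : Int) ≤ v ∧ v < (nbhd.length : Int)) →
    pvRel cnn_cutoff nbhd labels consider →
    pvQInv cnn_cutoff nbhd labels queue →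
    (ms.foldl (fun st v => if pvPred cnn_cutoff nbhd u v then pvStepB current st v else st)
        (labels, queue) =
      ((ms.foldl (pvStepA cnn_cutoff nbhd current neighbours) (labels, consider, queue)).1,
       (ms.foldl (pvStepA cnn_cutoff nbhd current neighbours) (labels, consider, queue)).2.2)) ∧
    pvRel cnn_cutoff nbhd
      (ms.foldl (pvStepA cnn_cutoff nbhd current neighbours) (labels, consider, queue)).1
      (ms.foldl (pvStepA cnn_cutoff nbhd current neighbours) (labels, consider, queue)).2.1 ∧
    pvQInv cnn_cutoff nbhd
      (ms.foldl (pvStepA cnn_cutoff nbhd current neighbours) (labels, consider, queue)).1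
      (ms.foldl (pvStepA cnn_cutoff nbhd current neighbours) (labels, consider, queue)).2.2 := by
  intro ms
  induction ms with
  | nil => exact fun labels consider queue _ hrel hq => ⟨rfl, hrel, hq⟩
  | cons m ms ih =>
    intro labels consider queue hms hrel hq
    have hm := hms m (List.mem_cons_self ..)
    obtain ⟨heq, hrel', hq', _⟩ :=
      pvStep_sim cnn_cutoff nbhd current hcur neighbours u labels consider queue m
        hm.1 hm.2 hnb hrel hq
    simp only [List.foldl_cons]
    rw [heq]
    exact ih _ _ _ (fun v hv => hms v (List.mem_cons_of_mem _ hv)) hrel' hq'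

-- A's pop block never relabels: a core head is popped unchanged
theorem pvPopA_cons (cnn_cutoff : Int) (nbhd : List (List Int))
    (labels : List Int) (consider : List Bool) (p : Int) (rest : List Int)
    (hcore : pvCore cnn_cutoff nbhd p = true) :
    pvPopA cnn_cutoff nbhd (p :: rest) labels consider = some (p, rest, labels, consider) := by
  have h : ¬ ((pvGetI nbhd [] p).length : Int) ≤ cnn_cutoff := by
    simp only [pvCore, decide_eq_true_eq] at hcore; omega
  simp [pvPopA, h]

theorem pvWhileB_nil (adj : List (List Int)) (current : Int) (fuel : Nat) (labels : List Int) :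
    pvWhileB adj current fuel labels [] = labels := by
  cases fuel <;> rfl

-- lock-step simulation of the two BFS loops (same fuel, B's queue = point :: A's queue)
theorem pvWhile_sim (cnn_cutoff : Int) (nbhd : List (List Int)) (current : Int)
    (hcur : current ≠ 0)
    (hpre : pvPre' cnn_cutoff nbhd) :
    ∀ (fuel : Nat) (point : Int) (labels : List Int) (consider : List Bool) (queue : List Int),
    -(nbhd.length : Int) ≤ point → point < (nbhd.length : Int) →
    pvCore cnn_cutoff nbhd point = true →
    pvRel cnn_cutoff nbhd labels consider →
    pvQInv cnn_cutoff nbhd labels queue →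
    pvWhileB (pvAdj cnn_cutoff nbhd) current fuel labels (point :: queue) =
      (pvWhileA cnn_cutoff nbhd current fuel point labels consider queue).1 ∧
    pvRel cnn_cutoff nbhd (pvWhileA cnn_cutoff nbhd current fuel point labels consider queue).1
      (pvWhileA cnn_cutoff nbhd current fuel point labels consider queue).2 := by
  intro fuel
  induction fuel with
  | zero => exact fun point labels consider queue _ _ _ hrel _ => ⟨rfl, hrel⟩
  | succ fuel ih =>
    intro point labels consider queue hp0 hp1 hpc hrel hq
    have hmemb : ∀ v ∈ pvGetI nbhd [] point,
        -(nbhd.length : Int) ≤ v ∧ v < (nbhd.length : Int) := by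
      intro v hv
      refine hpre _ (pvNb_mem nbhd point hp0 hp1) ?_ v hv
      simpa [pvCore] using hpc
    obtain ⟨hfe, hfrel, hfq⟩ :=
      pvFold_sim cnn_cutoff nbhd current hcur point (pvGetI nbhd [] point) rfl
        (pvGetI nbhd [] point) labels consider queue hmemb hrel hq
    have hadj := pvAdj_spec cnn_cutoff nbhd point hp0 hp1 hpc
    have hBstep : pvWhileB (pvAdj cnn_cutoff nbhd) current (fuel + 1) labels (point :: queue) =
        pvWhileB (pvAdj cnn_cutoff nbhd) current fuel
          ((pvGetI nbhd [] point).foldl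
            (pvStepA cnn_cutoff nbhd current (pvGetI nbhd [] point)) (labels, consider, queue)).1
          ((pvGetI nbhd [] point).foldl
            (pvStepA cnn_cutoff nbhd current (pvGetI nbhd [] point)) (labels, consider, queue)).2.2 := by
      show pvWhileB (pvAdj cnn_cutoff nbhd) current fuel
          ((pvGetI (pvAdj cnn_cutoff nbhd) [] point).foldl (pvStepB current) (labels, queue)).1
          ((pvGetI (pvAdj cnn_cutoff nbhd) [] point).foldl (pvStepB current) (labels, queue)).2 = _
      rw [hadj, List.foldl_filter]
      rw [show ((pvGetI nbhd [] point).foldl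
            (fun st v => if pvPred cnn_cutoff nbhd point v then pvStepB current st v else st)
            (labels, queue)) =
          (((pvGetI nbhd [] point).foldl
              (pvStepA cnn_cutoff nbhd current (pvGetI nbhd [] point)) (labels, consider, queue)).1,
           ((pvGetI nbhd [] point).foldl
              (pvStepA cnn_cutoff nbhd current (pvGetI nbhd [] point)) (labels, consider, queue)).2.2)
        from hfe]
    have hAstep : pvWhileA cnn_cutoff nbhd current (fuel + 1) point labels consider queue =
        (match pvPopA cnn_cutoff nbhd
            ((pvGetI nbhd [] point).foldl
              (pvStepA cnn_cutoff nbhd current (pvGetI nbhd [] point)) (labels, consider, queue)).2.2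
            ((pvGetI nbhd [] point).foldl
              (pvStepA cnn_cutoff nbhd current (pvGetI nbhd [] point)) (labels, consider, queue)).1
            ((pvGetI nbhd [] point).foldl
              (pvStepA cnn_cutoff nbhd current (pvGetI nbhd [] point)) (labels, consider, queue)).2.1 with
         | none =>
            (((pvGetI nbhd [] point).foldl
              (pvStepA cnn_cutoff nbhd current (pvGetI nbhd [] point)) (labels, consider, queue)).1,
             ((pvGetI nbhd [] point).foldl
              (pvStepA cnn_cutoff nbhd current (pvGetI nbhd [] point)) (labels, consider, queue)).2.1)
         | some (p, q, l, c) => pvWhileA cnn_cutoff nbhd current fuel p l c q) := rfl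
    rw [hBstep, hAstep]
    cases hqq : ((pvGetI nbhd [] point).foldl
        (pvStepA cnn_cutoff nbhd current (pvGetI nbhd [] point)) (labels, consider, queue)).2.2 with
    | nil =>
      rw [pvWhileB_nil]
      simp only [pvPopA]
      exact ⟨trivial, hfrel⟩
    | cons p rest =>
      have hp := hfq p (by rw [hqq]; exact List.mem_cons_self ..)
      have hrest : pvQInv cnn_cutoff nbhd
          ((pvGetI nbhd [] point).foldl
            (pvStepA cnn_cutoff nbhd current (pvGetI nbhd [] point)) (labels, consider, queue)).1
          rest := fun v hv => hfq v (by rw [hqq]; exact List.mem_cons_of_mem _ hv)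
      rw [pvPopA_cons cnn_cutoff nbhd _ _ p rest hp.2.1]
      exact ih p _ _ rest hp.1.1 hp.1.2 hp.2.1 hfrel hrest

-- the outer seed loops stay in lock-step
theorem pvOuter_sim (cnn_cutoff : Int) (nbhd : List (List Int))
    (hpre : pvPre' cnn_cutoff nbhd) :
    ∀ (ixs : List Nat) (labels : List Int) (consider : List Bool) (current : Int),
    (∀ i ∈ ixs, i < nbhd.length) →
    pvRel cnn_cutoff nbhd labels consider → 0 < current →
    (ixs.foldl (pvOuterB cnn_cutoff nbhd (pvAdj cnn_cutoff nbhd)) (labels, current) =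
      ((ixs.foldl (pvOuterA cnn_cutoff nbhd) (labels, consider, current)).1,
       (ixs.foldl (pvOuterA cnn_cutoff nbhd) (labels, consider, current)).2.2)) ∧
    pvRel cnn_cutoff nbhd (ixs.foldl (pvOuterA cnn_cutoff nbhd) (labels, consider, current)).1
      (ixs.foldl (pvOuterA cnn_cutoff nbhd) (labels, consider, current)).2.1 ∧
    0 < (ixs.foldl (pvOuterA cnn_cutoff nbhd) (labels, consider, current)).2.2 := by
  intro ixs
  induction ixs with
  | nil => exact fun labels consider current _ hrel hcur => ⟨rfl, hrel, hcur⟩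
  | cons i ixs ih =>
    intro labels consider current hix hrel hcur
    have hiN : i < nbhd.length := hix i (List.mem_cons_self ..)
    have hb0 : -(nbhd.length : Int) ≤ (i : Int) := by omega
    have hb1 : (i : Int) < (nbhd.length : Int) := by exact_mod_cast hiN
    have hgc : pvGetI consider false (i : Int) = consider.getD i false := by
      rw [pvGetI_natCast _ _ _ (by rw [hrel.2.1]; exact hiN)]
    have hiL : i < labels.length := by rw [hrel.1]; exact hiN
    have hiC : i < consider.length := by rw [hrel.2.1]; exact hiN
    have hsl : ∀ a : Int, pvSetI labels (i : Int) a = labels.set i a := fun a => by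
      rw [pvSetI_eq_set _ _ _ (by omega) (by exact_mod_cast hiL), pvIdx_natCast]
    have hsc : ∀ b : Bool, pvSetI consider (i : Int) b = consider.set i b := fun b => by
      rw [pvSetI_eq_set _ _ _ (by omega) (by exact_mod_cast hiC), pvIdx_natCast]
    simp only [List.foldl_cons]
    by_cases hci : consider.getD i false = true
    · have hl0 : labels.getD i 0 = 0 := (hrel.2.2 i hiN).1 hci
      by_cases hcore : pvCore cnn_cutoff nbhd (i : Int) = true
      · -- seed a new cluster
        have hnle : ¬ ((pvGetI nbhd [] (i : Int)).length : Int) ≤ cnn_cutoff := by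
          simp only [pvCore, decide_eq_true_eq] at hcore; omega
        have hA : pvOuterA cnn_cutoff nbhd (labels, consider, current) i =
            ((pvWhileA cnn_cutoff nbhd current (nbhd.length + 1) (i : Int)
                (labels.set i current) (consider.set i false) []).1,
             (pvWhileA cnn_cutoff nbhd current (nbhd.length + 1) (i : Int)
                (labels.set i current) (consider.set i false) []).2,
             current + 1) := by
          simp only [pvOuterA, hgc, hci, hnle, hsl, hsc]
          simp
        have hB : pvOuterB cnn_cutoff nbhd (pvAdj cnn_cutoff nbhd) (labels, current) i =
            (pvWhileB (pvAdj cnn_cutoff nbhd) current (nbhd.length + 1)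
              (labels.set i current) [(i : Int)], current + 1) := by
          simp only [pvOuterB, hl0, hcore, hsl]
          simp
        have hrel1 : pvRel cnn_cutoff nbhd (labels.set i current) (consider.set i false) := by
          refine ⟨by simpa using hrel.1, by simpa using hrel.2.1, ?_⟩
          intro k hk
          by_cases hkm : k = i
          · subst hkm
            constructor
            · intro hf; rw [pv_getD_set_eq _ _ _ _ hiC] at hf; exact absurd hf (by simp)
            · intro _
              rw [pv_getD_set_eq _ _ _ _ hiC, pv_getD_set_eq _ _ _ _ hiL]
              constructor
              · intro h; exact absurd h (by simp)
              · intro h; exact absurd h (by omega)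
          · rw [pv_getD_set_ne _ _ _ _ _ (fun h => hkm h.symm),
                pv_getD_set_ne _ _ _ _ _ (fun h => hkm h.symm)]
            exact hrel.2.2 k hk
        obtain ⟨hweq, hwrel⟩ := pvWhile_sim cnn_cutoff nbhd current (by omega) hpre
          (nbhd.length + 1) (i : Int) (labels.set i current) (consider.set i false) []
          hb0 hb1 hcore hrel1 (by intro v hv; cases hv)
        rw [hA, hB, hweq]
        exact ih _ _ _ (fun j hj => hix j (List.mem_cons_of_mem _ hj)) hwrel (by omega)
      · -- low-degree seed: A marks noise (labels unchanged), B skips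
        have hle : ((pvGetI nbhd [] (i : Int)).length : Int) ≤ cnn_cutoff := by
          simp only [pvCore, decide_eq_true_eq] at hcore; omega
        have hA : pvOuterA cnn_cutoff nbhd (labels, consider, current) i =
            (labels, consider.set i false, current) := by
          simp only [pvOuterA, hgc, hci, hle, hsl, hsc]
          simp [pv_set_self labels i hiL hl0]
        have hB : pvOuterB cnn_cutoff nbhd (pvAdj cnn_cutoff nbhd) (labels, current) i =
            (labels, current) := by
          simp only [pvOuterB, hl0]
          simp [hcore]
        have hrel1 : pvRel cnn_cutoff nbhd labels (consider.set i false) := by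
          refine ⟨hrel.1, by simpa using hrel.2.1, ?_⟩
          intro k hk
          by_cases hkm : k = i
          · subst hkm
            constructor
            · intro hf; rw [pv_getD_set_eq _ _ _ _ hiC] at hf; exact absurd hf (by simp)
            · intro hc; exact absurd hc hcore
          · rw [pv_getD_set_ne _ _ _ _ _ (fun h => hkm h.symm)]
            exact hrel.2.2 k hk
        rw [hA, hB]
        exact ih _ _ _ (fun j hj => hix j (List.mem_cons_of_mem _ hj)) hrel1 hcur
    · -- consider[i] already false: both loops skip i
      have hcf : consider.getD i false = false := by
        cases h : consider.getD i false
        · rfl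
        · exact absurd h hci
      have hA : pvOuterA cnn_cutoff nbhd (labels, consider, current) i =
          (labels, consider, current) := by
        simp only [pvOuterA, hgc, hcf]
        simp
      have hB : pvOuterB cnn_cutoff nbhd (pvAdj cnn_cutoff nbhd) (labels, current) i =
          (labels, current) := by
        by_cases hli : labels.getD i 0 = 0
        · have hcore : pvCore cnn_cutoff nbhd (i : Int) = false := by
            cases h : pvCore cnn_cutoff nbhd (i : Int)
            · rfl
            · have := ((hrel.2.2 i hiN).2 h).mpr hli
              rw [hcf] at this; exact absurd this (by simp)
          simp only [pvOuterB, hli]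
          simp [hcore]
        · simp only [pvOuterB]
          rw [if_pos hli]
      rw [hA, hB]
      exact ih _ _ _ (fun j hj => hix j (List.mem_cons_of_mem _ hj)) hrel hcur

-- ===== VERDICT (by name: the statement is the Claim_ definition above) =====
theorem fit_from_neighbours_spec : Claim_equal_fit_from_neighbours := by
  intro cnn_cutoff nbhd0 _hdom hpre
  unfold Spec_fit_from_neighbours fit_from_neighbours fit_from_neighbours_alt
  have hpre' : pvPre' cnn_cutoff (nbhd0.map (fun nb => PySem.Set.ofList nb)) := by
    intro nb hmem hcnb v hv
    obtain ⟨nb1, hnb1, rfl⟩ := List.mem_map.mp hmem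
    have hv1 : v ∈ nb1 := (PySem.Set.mem_ofList _ _).mp hv
    have := hpre nb1 hnb1 hcnb v hv1
    simpa [List.length_map] using this
  have hrel : pvRel cnn_cutoff (nbhd0.map (fun nb => PySem.Set.ofList nb))
      (List.replicate (nbhd0.map (fun nb => PySem.Set.ofList nb)).length 0)
      (List.replicate (nbhd0.map (fun nb => PySem.Set.ofList nb)).length true) := by
    refine ⟨List.length_replicate, List.length_replicate, ?_⟩
    intro k hk
    rw [List.length_map] at hk
    simp [List.getD_eq_getElem?_getD, hk]
  have h := pvOuter_sim cnn_cutoff (nbhd0.map (fun nb => PySem.Set.ofList nb)) hpre'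
    (List.range (nbhd0.map (fun nb => PySem.Set.ofList nb)).length)
    (List.replicate (nbhd0.map (fun nb => PySem.Set.ofList nb)).length 0)
    (List.replicate (nbhd0.map (fun nb => PySem.Set.ofList nb)).length true) 1
    (fun i hi => List.mem_range.mp hi) hrel (by norm_num)
  exact (congrArg Prod.fst h.1).symm
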